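-- pv_equiv track=rewrite | github.com/sungkihwan/algorithm-study | recursion/2447.py | makeStar
-- ===== SOURCE A (Python) =====
-- def makeStar(N):
--     if N == 3:
--         return ['***', '* *', '***']
--
--     subStars = makeStar(N//3)
--     stars = []
--
--     for S in subStars:
--         stars.append(S*3)
--     for S in subStars:
--         stars.append(S+' '*len(subStars)+S)
--     for S in subStars:
--         stars.append(S*3)
--
--     return stars
-- ===== SOURCE B (Python) =====
-- def makeStar(N):
--     # grid side: shrink N by //3 until it bottoms out; the pattern is only
--     # defined when this lands exactly on 3 (otherwise A never returns either)
--     n, size = N, 3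
--     while n > 3:
--         n //= 3
--         size *= 3
--     if n != 3:
--         raise ValueError("N must reduce to 3 by repeated floor division by 3")
--
--     # row i is determined by the base-3 digits of i alone: at each digit level,
--     # digit 1 blanks the middle third of the row, any other digit repeats it
--     def row(i, m):
--         if m == 1:
--             return '*'
--         t = m // 3
--         sub = row(i % t, t)
--         if (i // t) % 3 == 1:
--             return sub + ' ' * t + sub
--         return sub + sub + sub
--
--     return [row(i, size) for i in range(size)]
-- ===== Notes on version B (the rewrite author's own statement) =====
-- stated objective: alternative
-- what changed: A builds the whole grid by recursively composing three vertical bands of N//3-sized subgrids; B first finds the grid side with a simple shrinking loop (n //= 3, size *= 3) and then builds every row independently, by a recursion on the base-3 digits of that row's own index (digit 1 blanks the middle third of the row, any other digit repeats it), with no whole-grid recursion and no subgrid lists.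
import Mathlib
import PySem

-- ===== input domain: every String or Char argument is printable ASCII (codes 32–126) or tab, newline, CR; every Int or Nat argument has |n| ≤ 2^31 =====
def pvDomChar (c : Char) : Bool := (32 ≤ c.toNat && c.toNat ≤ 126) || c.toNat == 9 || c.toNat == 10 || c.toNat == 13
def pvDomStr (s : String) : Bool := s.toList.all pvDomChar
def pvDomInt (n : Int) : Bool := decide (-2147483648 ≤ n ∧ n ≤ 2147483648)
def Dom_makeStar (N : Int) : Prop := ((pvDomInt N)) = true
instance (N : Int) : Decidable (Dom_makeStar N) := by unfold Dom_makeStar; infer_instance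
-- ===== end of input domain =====

-- B replaces A's recursive whole-grid composition by building every row independently from the
-- base-3 digits of its own row index (alternative algorithm, similar cost); equivalence is
-- claimed on Pre_: exactly the N on which A returns at all.

-- ===== PORT A =====
-- A recurses on N//3; it returns only for N whose iterated //3 lands exactly on 3 and otherwise
-- recurses forever (RecursionError in Python).  The `N < 3` guard below only makes that
-- non-returning computation total (it is unreachable under Pre_); 'S*3' and "' '*len(subStars)"
-- are ported exactly as character-list concatenation/replication (all-ASCII strings).
def makeStar (N : Int) : List String :=
  if N = 3 then ["***", "* *", "***"]
  else if N < 3 then []  -- Python never returns here; totality guard only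
  else
    let subStars := makeStar (PySem.Int.floordiv N 3)
    let stars : List String := []
    let stars := subStars.foldl (fun stars S => stars ++ [String.ofList (S.toList ++ S.toList ++ S.toList)]) stars
    let stars := subStars.foldl (fun stars S => stars ++ [String.ofList (S.toList ++ List.replicate subStars.length ' ' ++ S.toList)]) stars
    let stars := subStars.foldl (fun stars S => stars ++ [String.ofList (S.toList ++ S.toList ++ S.toList)]) stars
    stars
termination_by N.toNat
decreasing_by
  have h := PySem.Int.floordiv_eq_ediv_of_pos (a := N) (b := 3) (by norm_num)
  rw [h]; omega

-- ===== PORT B =====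
-- Source B's first loop: `while n > 3: n //= 3; size *= 3` (returns the final (n, size))
def pvLoop (n size : Int) : Int × Int :=
  if 3 < n then pvLoop (PySem.Int.floordiv n 3) (size * 3) else (n, size)
termination_by n.toNat
decreasing_by
  have h := PySem.Int.floordiv_eq_ediv_of_pos (a := n) (b := 3) (by norm_num)
  rw [h]; omega

-- Source B's row(i, m): recursion on the base-3 digits of the row index i.  Python's base case is
-- `m == 1`; for m < 1 the Python never returns (i % 0 raises / loops), so `m ≤ 1` is only a
-- totality guard, unreachable on the powers of 3 row() is actually called with.  `' ' * t` is
-- List.replicate t.toNat (for t < 0 Python's `' '*t` is also empty), `+` on strings is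
-- character-list concatenation (exact).
def pvRow (i m : Int) : String :=
  if m ≤ 1 then "*"
  else
    let t := PySem.Int.floordiv m 3
    let sub := pvRow (PySem.Int.mod i t) t
    if PySem.Int.mod (PySem.Int.floordiv i t) 3 = 1 then
      String.ofList (sub.toList ++ List.replicate t.toNat ' ' ++ sub.toList)
    else
      String.ofList (sub.toList ++ sub.toList ++ sub.toList)
termination_by m.toNat
decreasing_by
  have h := PySem.Int.floordiv_eq_ediv_of_pos (a := m) (b := 3) (by norm_num)
  rw [h]; omega

-- the `[]` stands for Source B's `raise ValueError` (no value; those inputs are outside Pre_)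
def makeStar_alt (N : Int) : List String :=
  let p := pvLoop N 3
  if p.1 ≠ 3 then []
  else (PySem.List.pyRange 0 p.2 1).map (fun i => pvRow i p.2)

-- ===== PRECONDITION & SPEC =====
-- Pre_: exactly the N on which the Python A returns, i.e. 3^(k+1) <= N < (4/3)*3^(k+1) for some
-- k : Nat (iterating N //= 3 then hits 3 exactly); on every other N the recursion never bottoms
-- out and A raises RecursionError / hangs, so those inputs are excluded.  The bound
-- k < N.toNat.log2 + 1 only makes the existential decidable quickly: 3^(k+1) ≤ N already
-- forces 2^(k+1) ≤ N and hence k < log2 N + 1, so the bound excludes nothing for any N.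
def Pre_makeStar (N : Int) : Prop :=
  ∃ k : Nat, k < N.toNat.log2 + 1 ∧ 3 ^ (k + 1) ≤ N ∧ 3 * N < 4 * 3 ^ (k + 1)
instance (N : Int) : Decidable (Pre_makeStar N) := by unfold Pre_makeStar; infer_instance

def pvWitness_makeStar : Int := 9

def Spec_makeStar (N : Int) (out : List String) : Prop := out = makeStar_alt N
instance (N : Int) (out : List String) : Decidable (Spec_makeStar N out) := by unfold Spec_makeStar; infer_instance

-- ===== CLAIM (what is proved, stated in full; the proofs are below) =====
def Claim_equal_makeStar : Prop := ∀ (N : Int), Dom_makeStar N → Pre_makeStar N → Spec_makeStar N (makeStar N)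

-- ===== LEMMAS AND PROOFS =====

-- the one-level fractal composition both programs turn out to satisfy
def pvTriple (ss : List String) : List String :=
  ss.map (fun S => String.ofList (S.toList ++ S.toList ++ S.toList))
  ++ ss.map (fun S => String.ofList (S.toList ++ List.replicate ss.length ' ' ++ S.toList))
  ++ ss.map (fun S => String.ofList (S.toList ++ S.toList ++ S.toList))

def pvStarIter : Nat → List String
  | 0 => ["***", "* *", "***"]
  | k + 1 => pvTriple (pvStarIter k)

theorem pvMakeStar_unfold (N : Int) (hN : 3 < N) :
    makeStar N = pvTriple (makeStar (PySem.Int.floordiv N 3)) := by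
  rw [makeStar]
  have h1 : ¬ (N = 3) := by omega
  have h2 : ¬ (N < 3) := by omega
  simp only [if_neg h1, if_neg h2, PySem.List.foldl_append_singleton_eq_map, pvTriple,
    List.nil_append, List.append_assoc]

theorem pvMakeStar_ret (k : Nat) :
    ∀ N : Int, 3 ^ (k + 1) ≤ N → 3 * N < 4 * 3 ^ (k + 1) → makeStar N = pvStarIter k := by
  induction k with
  | zero =>
    intro N h1 h2
    norm_num at h1 h2
    have h3 : N = 3 := by omega
    subst h3
    rw [makeStar]; norm_num [pvStarIter]
  | succ k ih =>
    intro N h1 h2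
    have hp : (1:Int) ≤ 3 ^ k := one_le_pow₀ (by norm_num)
    have e1 : (3:Int) ^ (k + 1 + 1) = 3 ^ (k + 1) * 3 := by ring
    rw [e1] at h1 h2
    have hp1 : (3:Int) ≤ 3 ^ (k + 1) := by
      have e2 : (3:Int) ^ (k + 1) = 3 ^ k * 3 := by ring
      nlinarith
    have hN3 : 3 < N := by nlinarith
    have hd := PySem.Int.floordiv_eq_ediv_of_pos (a := N) (b := 3) (by norm_num)
    have hdm := Int.mul_ediv_add_emod N 3
    have hr0 := Int.emod_nonneg N (show (3:Int) ≠ 0 by norm_num)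
    have hr3 := Int.emod_lt_of_pos N (show (0:Int) < 3 by norm_num)
    have hq1 : 3 ^ (k + 1) ≤ PySem.Int.floordiv N 3 := by rw [hd]; omega
    have hq2 : 3 * PySem.Int.floordiv N 3 < 4 * 3 ^ (k + 1) := by rw [hd]; omega
    rw [pvMakeStar_unfold N hN3, ih _ hq1 hq2, pvStarIter]

-- one level of pvRow: for i = i₀ + a·M in band a of a side-3M grid, peel off digit a
theorem pvRowStep (I M i a : Int) (hM : 0 < M) (hi : 0 ≤ i) (hi' : i < M)
    (ha : 0 ≤ a) (ha' : a < 3) (hI : I = i + a * M) :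
    pvRow I (3 * M) =
      if a = 1 then
        String.ofList ((pvRow i M).toList ++ List.replicate M.toNat ' ' ++ (pvRow i M).toList)
      else
        String.ofList ((pvRow i M).toList ++ (pvRow i M).toList ++ (pvRow i M).toList) := by
  subst hI
  rw [pvRow]
  have h1 : ¬ (3 * M ≤ 1) := by omega
  have ht : PySem.Int.floordiv (3 * M) 3 = M := by
    rw [PySem.Int.floordiv_eq_ediv_of_pos (by norm_num)]; omega
  have hmod : PySem.Int.mod (i + a * M) M = i := by
    rw [PySem.Int.mod_eq_emod_of_pos hM, Int.add_mul_emod_self_right, Int.emod_eq_of_lt hi hi']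
  have hdiv : PySem.Int.floordiv (i + a * M) M = a := by
    rw [PySem.Int.floordiv_eq_ediv_of_pos hM, Int.add_mul_ediv_right _ _ (ne_of_gt hM),
        Int.ediv_eq_zero_of_lt hi hi']; ring
  have hda : PySem.Int.mod a 3 = a := by
    rw [PySem.Int.mod_eq_emod_of_pos (show (0:Int) < 3 by norm_num), Int.emod_eq_of_lt ha ha']
  simp only [if_neg h1, ht, hmod, hdiv, hda]

theorem pvMap_shift {α : Type} (f : Int → α) (M c : Int) :
    (PySem.List.pyRange (0 + c) (M + c) 1).map f
      = (PySem.List.pyRange 0 M 1).map (fun j => f (j + c)) := by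
  simp only [PySem.List.pyRange_one, List.map_map]
  have h : (M + c - (0 + c)) = M - 0 := by ring
  rw [h]
  apply List.map_congr_left
  intro k _
  simp only [Function.comp]
  congr 1
  ring

theorem pvSplit3 (M : Int) (hM : 0 < M) :
    PySem.List.pyRange 0 (3 * M) 1
      = PySem.List.pyRange 0 M 1 ++ PySem.List.pyRange (0 + M) (M + M) 1
        ++ PySem.List.pyRange (0 + 2 * M) (M + 2 * M) 1 := by
  have e1 : (0:Int) + M = M := by ring
  have e2 : M + M = 2 * M := by ring
  have e3 : (0:Int) + 2 * M = 2 * M := by ring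
  have e4 : M + 2 * M = 3 * M := by ring
  rw [e1, e2, e3, e4, List.append_assoc,
      ← PySem.List.pyRange_one_append M (2*M) (3*M) (by omega) (by omega),
      ← PySem.List.pyRange_one_append 0 M (3*M) (by omega) (by omega)]

def pvGrid (size : Int) : List String :=
  (PySem.List.pyRange 0 size 1).map (fun i => pvRow i size)

theorem pvGrid_triple (M : Int) (hM : 0 < M) :
    pvGrid (3 * M) = pvTriple (pvGrid M) := by
  simp only [pvGrid, pvTriple, List.map_map, List.length_map, PySem.List.length_pyRange_one]
  rw [pvSplit3 M hM]
  simp only [List.map_append, pvMap_shift, Function.comp_def]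
  have hlen : (M - 0).toNat = M.toNat := by omega
  congr 1
  · congr 1
    · apply List.map_congr_left
      intro i hi
      rw [PySem.List.mem_pyRange_one] at hi
      rw [pvRowStep i M i 0 hM hi.1 hi.2 (by norm_num) (by norm_num) (by ring),
          if_neg (by norm_num)]
    · apply List.map_congr_left
      intro i hi
      rw [PySem.List.mem_pyRange_one] at hi
      rw [pvRowStep (i + M) M i 1 hM hi.1 hi.2 (by norm_num) (by norm_num) (by ring),
          if_pos rfl, hlen]
  · apply List.map_congr_left
    intro i hi
    rw [PySem.List.mem_pyRange_one] at hi
    rw [pvRowStep (i + 2 * M) M i 2 hM hi.1 hi.2 (by norm_num) (by norm_num) (by ring),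
        if_neg (by norm_num)]

theorem pvGrid_base : pvGrid 3 = ["***", "* *", "***"] := by
  have h1 : ∀ i : Int, pvRow i 1 = "*" := by intro i; rw [pvRow]; norm_num
  have h3 : ∀ i : Int, pvRow i 3 = if PySem.Int.mod i 3 = 1 then "* *" else "***" := by
    intro i
    rw [pvRow]
    have e1 : PySem.Int.floordiv 3 3 = 1 := by decide
    have e2 : ∀ x : Int, PySem.Int.floordiv x 1 = x := fun x => by
      rw [PySem.Int.floordiv_eq_ediv_of_pos (by norm_num)]; exact Int.ediv_one x
    simp only [e1, e2, h1]
    norm_num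
    split <;> rfl
  have hr : PySem.List.pyRange 0 3 1 = [0, 1, 2] := by rfl
  have m0 : PySem.Int.mod 0 3 = 0 := by decide
  have m1 : PySem.Int.mod 1 3 = 1 := by decide
  have m2 : PySem.Int.mod 2 3 = 2 := by decide
  simp only [pvGrid, hr, List.map, h3, m0, m1, m2]
  norm_num

theorem pvGrid_pow (k : Nat) : pvGrid (3 ^ (k + 1)) = pvStarIter k := by
  induction k with
  | zero =>
    norm_num
    exact pvGrid_base
  | succ k ih =>
    have hp : (0:Int) < 3 ^ (k + 1) := by positivity
    have h1 : (3:Int) ^ (k + 1 + 1) = 3 * 3 ^ (k + 1) := by ring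
    rw [h1, pvGrid_triple _ hp, ih, pvStarIter]

theorem pvLoop_spec (k : Nat) :
    ∀ n size : Int, 3 ^ (k + 1) ≤ n → 3 * n < 4 * 3 ^ (k + 1) → pvLoop n size = (3, size * 3 ^ k) := by
  induction k with
  | zero =>
    intro n size h1 h2
    norm_num at h1 h2
    have h3 : n = 3 := by omega
    subst h3
    rw [pvLoop]; norm_num
  | succ k ih =>
    intro n size h1 h2
    have hp : (1:Int) ≤ 3 ^ k := one_le_pow₀ (by norm_num)
    have e1 : (3:Int) ^ (k + 1 + 1) = 3 ^ (k + 1) * 3 := by ring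
    rw [e1] at h1 h2
    have hp1 : (3:Int) ≤ 3 ^ (k + 1) := by
      have e2 : (3:Int) ^ (k + 1) = 3 ^ k * 3 := by ring
      nlinarith
    have hN3 : 3 < n := by nlinarith
    have hd := PySem.Int.floordiv_eq_ediv_of_pos (a := n) (b := 3) (by norm_num)
    have hdm := Int.mul_ediv_add_emod n 3
    have hr0 := Int.emod_nonneg n (show (3:Int) ≠ 0 by norm_num)
    have hr3 := Int.emod_lt_of_pos n (show (0:Int) < 3 by norm_num)
    have hq1 : 3 ^ (k + 1) ≤ PySem.Int.floordiv n 3 := by rw [hd]; omega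
    have hq2 : 3 * PySem.Int.floordiv n 3 < 4 * 3 ^ (k + 1) := by rw [hd]; omega
    rw [pvLoop, if_pos hN3, ih _ _ hq1 hq2]
    have e3 : size * 3 * 3 ^ k = size * 3 ^ (k + 1) := by ring
    rw [e3]

theorem pvAlt_eq_grid (N : Int) :
    makeStar_alt N = if (pvLoop N 3).1 ≠ 3 then [] else pvGrid ((pvLoop N 3).2) := rfl

theorem pvAlt_ret (k : Nat) (N : Int) (h1 : 3 ^ (k + 1) ≤ N) (h2 : 3 * N < 4 * 3 ^ (k + 1)) :
    makeStar_alt N = pvStarIter k := by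
  rw [pvAlt_eq_grid, pvLoop_spec k N 3 h1 h2]
  norm_num
  have e : (3:Int) * 3 ^ k = 3 ^ (k + 1) := by ring
  rw [e]
  exact pvGrid_pow k

theorem pvMain (k : Nat) (N : Int) (h1 : 3 ^ (k + 1) ≤ N) (h2 : 3 * N < 4 * 3 ^ (k + 1)) :
    makeStar N = makeStar_alt N := by
  rw [pvMakeStar_ret k N h1 h2, pvAlt_ret k N h1 h2]

-- ===== VERDICT (by name: the statement is the Claim_ definition above) =====
theorem makeStar_spec : Claim_equal_makeStar := by
  intro N _ hpre
  unfold Spec_makeStar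
  unfold Pre_makeStar at hpre
  obtain ⟨k, _, h1, h2⟩ := hpre
  exact pvMain k N h1 h2
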